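-- pv_equiv track=rewrite | github.com/Metsehafe-Eyasu/A2SV_programming | First-Camp/leetcode/1170. Compare Strings by Frequency of the Smallest Character.py | smallestCharFreq
-- ===== SOURCE A (Python) =====
-- def smallestCharFreq(word: str) -> int:
--     char = word[0]
--     count = 1
--     length = len(word)
--     for i in range(1, length):
--         if word[i] < char:
--             char = word[i]
--             count = 1
--         elif word[i] == char:
--             count += 1
--     return count
-- ===== SOURCE B (Python) =====
-- def smallestCharFreq(word: str) -> int:
--     letters = sorted(word)
--     return letters.count(letters[0])
-- ===== Notes on version B (the rewrite author's own statement) =====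
-- stated objective: simpler
-- what changed: Replaces A's single min-tracking scan (running smallest char + reset-on-smaller counter) by sort-then-count: sort the characters and count the occurrences of the first (smallest) one.
import Mathlib
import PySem

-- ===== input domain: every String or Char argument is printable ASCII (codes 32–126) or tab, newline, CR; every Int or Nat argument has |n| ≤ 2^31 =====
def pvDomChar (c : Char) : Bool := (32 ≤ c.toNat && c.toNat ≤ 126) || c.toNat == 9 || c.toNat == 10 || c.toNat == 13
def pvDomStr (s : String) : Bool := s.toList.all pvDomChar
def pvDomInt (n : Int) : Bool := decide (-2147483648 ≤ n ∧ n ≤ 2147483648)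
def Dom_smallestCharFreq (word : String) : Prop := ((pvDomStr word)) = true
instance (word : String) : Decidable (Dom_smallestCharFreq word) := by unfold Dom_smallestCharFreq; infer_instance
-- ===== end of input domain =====

-- B replaces A's single min-tracking scan by sort-then-count (simpler decomposition); equal on all non-empty strings.

-- ===== PORT A =====
-- A: char = word[0]; count = 1; for i in range(1, len(word)): compare word[i] with char.
def smallestCharFreq (word : String) : Int :=
  match PySem.Str.pyGet? word 0 with
  | none => 0   -- word[0] raises IndexError on the empty string; excluded by Pre_
  | some char =>
    let cs := word.toList
    let st :=
      (PySem.List.pyRange 1 (PySem.Str.len word) 1).foldl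
        (fun (st : Char × Int) i =>
          let wi := PySem.List.pyGetD cs i 'A'   -- index always in range in this loop
          if wi < st.1 then (wi, 1)
          else if wi = st.1 then (st.1, st.2 + 1)
          else st)
        (char, 1)
    st.2

-- ===== PORT B =====
-- B: letters = sorted(word); return letters.count(letters[0])
def smallestCharFreq_alt (word : String) : Int :=
  let letters := PySem.List.sorted word.toList (fun c => c) false
  match PySem.List.pyGet? letters 0 with
  | none => 0   -- letters[0] raises IndexError on the empty string; excluded by Pre_
  | some m => (PySem.List.count letters m : Int)

-- ===== PRECONDITION & SPEC =====
-- Pre_ excludes only the empty string, on which both Pythons raise IndexError.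
def Pre_smallestCharFreq (word : String) : Prop := word ≠ ""
instance (word : String) : Decidable (Pre_smallestCharFreq word) := by unfold Pre_smallestCharFreq; infer_instance
def pvWitness_smallestCharFreq : String := "baeab"

def Spec_smallestCharFreq (word : String) (out : Int) : Prop := out = smallestCharFreq_alt word
instance (word : String) (out : Int) : Decidable (Spec_smallestCharFreq word out) := by unfold Spec_smallestCharFreq; infer_instance

-- ===== CLAIM (what is proved, stated in full; the proofs are below) =====
def Claim_equal_smallestCharFreq : Prop := ∀ (word : String), Dom_smallestCharFreq word → Pre_smallestCharFreq word → Spec_smallestCharFreq word (smallestCharFreq word)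

-- ===== LEMMAS AND PROOFS =====

theorem foldl_min_le_init (t : List Char) (c : Char) : t.foldl min c ≤ c := by
  induction t generalizing c with
  | nil => simp
  | cons x t ih => exact le_trans (ih (min c x)) (min_le_left c x)

-- A's loop over the tail computes (running minimum, count of the current minimum so far).
theorem foldA_spec (t : List Char) (c : Char) (k : Int) :
    t.foldl
      (fun (st : Char × Int) wi =>
        if wi < st.1 then (wi, 1)
        else if wi = st.1 then (st.1, st.2 + 1)
        else st)
      (c, k)
    = (t.foldl min c,
       if t.foldl min c = c then k + (t.count c : Int) else (t.count (t.foldl min c) : Int)) := by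
  induction t generalizing c k with
  | nil => simp
  | cons x t ih =>
    simp only [List.foldl_cons, List.count_cons]
    by_cases hlt : x < c
    · rw [if_pos hlt, ih, min_eq_right hlt.le]
      have hne : t.foldl min x ≠ c := fun h => absurd (h ▸ foldl_min_le_init t x) (not_le.mpr hlt)
      by_cases hx : t.foldl min x = x
      · simp [hx, hlt.ne]
        ring
      · simp [hx, hne]
        exact fun h => hx h.symm
    · rw [if_neg hlt]
      by_cases heq : x = c
      · rw [if_pos heq, ih]
        subst heq
        rw [min_self]
        by_cases hm : t.foldl min x = x
        · simp [hm]
          ring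
        · simp [hm]
          exact fun h => hm h.symm
      · rw [if_neg heq, ih]
        have hcx : min c x = c := min_eq_left (le_of_not_gt (fun h => hlt h))
        rw [hcx]
        have h2 : c < x := lt_of_le_of_ne (not_lt.mp hlt) (fun h => heq h.symm)
        by_cases hm : t.foldl min c = c
        · simp [hm]
          exact heq
        · have hnx : t.foldl min c ≠ x :=
            ne_of_lt (lt_of_le_of_lt (foldl_min_le_init t c) h2)
          simp [hm]
          exact fun h => hnx h.symm

-- ===== VERDICT (by name: the statement is the Claim_ definition above) =====
theorem smallestCharFreq_spec : Claim_equal_smallestCharFreq := by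
  intro word _ hpre
  have hne : word.toList ≠ [] := by
    intro h
    exact hpre (String.toList_inj.mp (by simpa using h))
  obtain ⟨c, t, hcs⟩ := List.exists_cons_of_ne_nil hne
  -- B side
  have hsne : PySem.List.sorted word.toList (fun c => c) false ≠ [] := by
    rw [Ne, PySem.List.sorted_eq_nil_iff]; exact hne
  obtain ⟨m, rest, hs⟩ := List.exists_cons_of_ne_nil hsne
  -- the two minima coincide
  have hmmem : m ∈ word.toList := (PySem.List.mem_sorted _ _ _ _).1 (hs ▸ List.mem_cons_self)
  have hmle : ∀ y ∈ word.toList, m ≤ y := PySem.List.key_head_sorted_le word.toList (fun y => y) hs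
  have hm'some : PySem.List.min? word.toList (fun y => y) = some (t.foldl min c) := by
    rw [hcs, PySem.List.min?_id_cons]
  have hm'mem : t.foldl min c ∈ word.toList := PySem.List.min?_mem hm'some
  have hm'le : ∀ y ∈ word.toList, t.foldl min c ≤ y := PySem.List.min?_isMin hm'some
  have hmm : m = t.foldl min c :=
    le_antisymm (hmle _ hm'mem) (hm'le _ hmmem)
  have hget : PySem.Str.pyGet? word 0 = some c := by
    have h0 : PySem.Str.pyGet? word ((0 : Nat) : Int) = word.toList[(0:Nat)]? := PySem.Str.pyGet?_natCast word 0
    rw [hcs] at h0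
    simpa using h0
  -- evaluate both ports
  unfold Spec_smallestCharFreq smallestCharFreq smallestCharFreq_alt
  rw [hget]
  simp only [PySem.List.pyGet?_zero, PySem.Str.len_eq, hcs]
  have hs' : PySem.List.sorted (c :: t) (fun c => c) false = m :: rest := by
    rw [← hcs]; exact hs
  rw [hs']
  simp only [List.getElem?_cons_zero]
  rw [PySem.List.foldl_pyRange_pyGetD' (c :: t) 'A'
        (fun (st : Char × Int) wi =>
          if wi < st.1 then (wi, 1)
          else if wi = st.1 then (st.1, st.2 + 1)
          else st) (c, 1) (by norm_num : (0:Int) ≤ 1)]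
  simp only [Int.toNat_one, List.drop_succ_cons, List.drop_zero]
  rw [foldA_spec]
  have hperm : (m :: rest).Perm (c :: t) := by
    rw [← hs']; exact PySem.List.sorted_perm (c :: t) (fun c => c) false
  have hcount : (m :: rest).count m = (c :: t).count m := hperm.count_eq m
  rw [PySem.List.count_eq, hcount, hmm]
  by_cases hc : t.foldl min c = c
  · rw [if_pos hc, hc]
    simp
    omega
  · rw [if_neg hc]
    simp [List.count_cons]
    exact fun h => hc h.symm
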